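-- pv_equiv track=rewrite | github.com/BrucceVT/VideoScribe-AI | src/postprocess.py | _limit_consecutive_repeats
-- ===== SOURCE A (Python) =====
-- from typing import List
--
-- def _limit_consecutive_repeats(lines: List[str], max_repeat: int) -> List[str]:
--     """
--     Limita repeticiones consecutivas EXACTAS de una línea.
--     Importante: NO elimina coros que se repiten con separación o con variaciones.
--     """
--     out = []
--     prev = None
--     count = 0
--
--     for ln in lines:
--         if ln == "":
--             # dejamos un salto suave, y reiniciamos conteo para NO matar estrofas repetidas separadas
--             if out and out[-1] != "":
--                 out.append("")
--             prev = None
--             count = 0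
--             continue
--
--         if ln == prev:
--             count += 1
--             if count < max_repeat:
--                 out.append(ln)
--         else:
--             prev = ln
--             count = 0
--             out.append(ln)
--
--     return out
-- ===== SOURCE B (Python) =====
-- from typing import List
--
-- def _limit_consecutive_repeats(lines: List[str], max_repeat: int) -> List[str]:
--     cap = max(1, max_repeat)
--     # stage 1: run position of every line (count of immediately preceding equal lines)
--     pos = [0] * len(lines)
--     for i in range(1, len(lines)):
--         if lines[i] == lines[i - 1]:
--             pos[i] = pos[i - 1] + 1
--     # stage 2: stateless per-line filter over the input and the table
--     prevs = [None] + lines[:-1]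
--     return [ln for ln, pv, p in zip(lines, prevs, pos)
--             if (ln != "" and p < cap) or (ln == "" and pv not in (None, ""))]
-- ===== Notes on version B (the rewrite author's own statement) =====
-- stated objective: alternative
-- what changed: B is two staged pure passes - first a table of run positions, then a stateless per-line filter over zip(lines, shifted lines, table) - replacing A's single state machine whose empty-line test inspects the output list being built.
import Mathlib
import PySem

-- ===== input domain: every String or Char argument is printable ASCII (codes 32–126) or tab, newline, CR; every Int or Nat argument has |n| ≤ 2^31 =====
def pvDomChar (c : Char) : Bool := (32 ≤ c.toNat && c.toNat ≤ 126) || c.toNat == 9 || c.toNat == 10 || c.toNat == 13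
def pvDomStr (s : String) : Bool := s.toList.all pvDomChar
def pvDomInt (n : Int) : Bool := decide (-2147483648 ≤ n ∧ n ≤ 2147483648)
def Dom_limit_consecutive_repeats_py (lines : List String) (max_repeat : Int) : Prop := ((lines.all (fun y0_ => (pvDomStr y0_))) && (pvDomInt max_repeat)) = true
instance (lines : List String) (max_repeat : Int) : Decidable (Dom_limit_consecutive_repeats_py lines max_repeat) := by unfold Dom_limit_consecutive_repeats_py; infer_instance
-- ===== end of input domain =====

-- B replaces A's single state machine (whose empty-line test inspects the output
-- built so far) by two staged pure passes: a run-position table, then a stateless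
-- per-line filter over zip(lines, shifted lines, table). Same values, same O(n) cost.

-- ===== PORT A =====
-- `out and out[-1] != ""` of the empty-line branch
def pvEmptyStep (out : List String) : List String :=
  if out ≠ [] ∧ out.getLast? ≠ some "" then out ++ [""] else out

-- the for-loop of A as structural recursion over the list, state (out, prev, count)
def pvLoopA (mr : Int) : List String → List String × Option String × Int → List String
  | [], st => st.1
  | ln :: rest, (out, prev, count) =>
    if ln = "" then
      pvLoopA mr rest (pvEmptyStep out, none, 0)
    else if some ln = prev then
      pvLoopA mr rest ((if count + 1 < mr then out ++ [ln] else out), prev, count + 1)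
    else
      pvLoopA mr rest (out ++ [ln], some ln, 0)

def limit_consecutive_repeats_py (lines : List String) (max_repeat : Int) : List String :=
  pvLoopA max_repeat lines ([], none, 0)

-- ===== PORT B =====
-- stage 1 of Source B: the run-position table pos (pos[i] = pos[i-1]+1 if lines[i]==lines[i-1] else 0)
def pvPosGo (prev : String) (p : Int) : List String → List Int
  | [] => []
  | y :: ys => (if y = prev then p + 1 else 0) :: pvPosGo y (if y = prev then p + 1 else 0) ys

def pvPos : List String → List Int
  | [] => []
  | x :: xs => 0 :: pvPosGo x 0 xs

-- stage 2 of Source B: prevs = [None] + lines[:-1]; comprehension over zip(lines, prevs, pos)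
def limit_consecutive_repeats_py_alt (lines : List String) (max_repeat : Int) : List String :=
  let cap := max 1 max_repeat
  let pos := pvPos lines
  let prevs : List (Option String) := none :: lines.dropLast.map some
  ((lines.zip prevs).zip pos).filterMap (fun t =>
    if (t.1.1 ≠ "" ∧ t.2 < cap) ∨ (t.1.1 = "" ∧ t.1.2 ≠ none ∧ t.1.2 ≠ some "") then some t.1.1 else none)

-- ===== PRECONDITION & SPEC =====
def Spec_limit_consecutive_repeats_py (lines : List String) (max_repeat : Int) (out : List String) : Prop := out = limit_consecutive_repeats_py_alt lines max_repeat
instance (lines : List String) (max_repeat : Int) (out : List String) : Decidable (Spec_limit_consecutive_repeats_py lines max_repeat out) := by unfold Spec_limit_consecutive_repeats_py; infer_instance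

-- ===== CLAIM (what is proved, stated in full; the proofs are below) =====
def Claim_equal_limit_consecutive_repeats_py : Prop := ∀ (lines : List String) (max_repeat : Int), Dom_limit_consecutive_repeats_py lines max_repeat → Spec_limit_consecutive_repeats_py lines max_repeat (limit_consecutive_repeats_py lines max_repeat)

-- ===== LEMMAS AND PROOFS =====

-- proof-only middle form: forward recursion with explicit context (last line, its run position)
def pvStep : Option (String × Int) → String → Int
  | some (pl, pp), ln => if ln = pl then pp + 1 else 0
  | none, _ => 0

def pvLastNE : Option (String × Int) → Bool
  | some (pl, _) => decide (pl ≠ "")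
  | none => false

def gB (cap : Int) : Option (String × Int) → List String → List String
  | _, [] => []
  | ctx, ln :: rs =>
    (if ln = "" then (if pvLastNE ctx then [ln] else [])
     else (if pvStep ctx ln < cap then [ln] else [])) ++ gB cap (some (ln, pvStep ctx ln)) rs

-- the correspondence between A's loop state and the context
def pvInv (out : List String) (prev : Option String) (count : Int) : Option (String × Int) → Prop
  | none => prev = none ∧ count = 0 ∧ out = []
  | some (pl, pp) =>
      0 ≤ pp ∧
      (if pl = "" then prev = none ∧ count = 0 else prev = some pl ∧ count = pp) ∧
      ((out ≠ [] ∧ out.getLast? ≠ some "") ↔ pl ≠ "")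


theorem pvEmptyStep_last (out : List String) :
    pvEmptyStep out = [] ∨ (pvEmptyStep out).getLast? = some "" := by
  unfold pvEmptyStep
  split
  · right; simp
  · next hc =>
    by_cases ho : out = []
    · left; exact ho
    · right
      by_cases hl : out.getLast? = some ""
      · exact hl
      · exact absurd ⟨ho, hl⟩ hc

theorem pvInv_push (out : List String) (ln : String) (hln : ln ≠ "") :
    pvInv (out ++ [ln]) (some ln) 0 (some (ln, 0)) := by
  refine ⟨le_refl 0, by simp [hln], ?_⟩
  constructor
  · intro _; exact hln
  · intro _
    refine ⟨by simp, ?_⟩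
    rw [List.getLast?_concat]
    simpa using hln

theorem pv_lemA (mr : Int) :
    ∀ (rest out : List String) (prev : Option String) (count : Int)
      (ctx : Option (String × Int)), pvInv out prev count ctx →
      pvLoopA mr rest (out, prev, count) = out ++ gB (max 1 mr) ctx rest := by
  intro rest
  induction rest with
  | nil => intro out prev count ctx _; simp [pvLoopA, gB]
  | cons ln rs ih =>
    intro out prev count ctx h
    have hcap : (0:Int) < max 1 mr := by omega
    by_cases hln : ln = ""
    · -- empty line
      subst hln
      have hstep : pvLoopA mr ("" :: rs) (out, prev, count)
          = pvLoopA mr rs (pvEmptyStep out, none, 0) := by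
        simp [pvLoopA]
      have hinv' : pvInv (pvEmptyStep out) none 0 (some ("", pvStep ctx "")) := by
        refine ⟨?_, by simp, ?_⟩
        · cases ctx with
          | none => simp [pvStep]
          | some pr =>
            obtain ⟨pl, pp⟩ := pr
            obtain ⟨hpp, -, -⟩ := h
            simp only [pvStep]
            split <;> omega
        · simp only [ne_eq, not_true_eq_false, iff_false, not_and]
          intro hne
          rcases pvEmptyStep_last out with he | he
          · exact absurd he hne
          · simp [he]
      have hout' : pvEmptyStep out = out ++ (if pvLastNE ctx then [""] else []) := by
        cases ctx with
        | none =>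
          obtain ⟨-, -, ho⟩ := h
          subst ho
          simp [pvEmptyStep, pvLastNE]
        | some pr =>
          obtain ⟨pl, pp⟩ := pr
          obtain ⟨-, -, hiff⟩ := h
          unfold pvEmptyStep
          by_cases hpl : pl = ""
          · rw [if_neg (by rw [hiff]; simpa using hpl), if_neg (by simp [pvLastNE, hpl])]
            simp
          · rw [if_pos (hiff.mpr hpl), if_pos (by simp [pvLastNE, hpl])]
      rw [hstep, ih (pvEmptyStep out) none 0 (some ("", pvStep ctx "")) hinv', hout']
      simp [gB, List.append_assoc]
    · -- nonempty line
      cases ctx with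
      | none =>
        obtain ⟨hp, hc, ho⟩ := h
        subst hp; subst hc; subst ho
        have hstep : pvLoopA mr (ln :: rs) ([], none, (0:Int))
            = pvLoopA mr rs ([] ++ [ln], some ln, 0) := by
          simp [pvLoopA, hln]
        rw [hstep, ih ([] ++ [ln]) (some ln) 0 (some (ln, 0)) (pvInv_push [] ln hln)]
        simp [gB, hln, pvStep, hcap]
      | some pr =>
        obtain ⟨pl, pp⟩ := pr
        obtain ⟨hpp, hpc, hiff⟩ := h
        by_cases hpl : pl = ""
        · -- prev line was empty: A has prev = none
          rw [if_pos hpl] at hpc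
          obtain ⟨hp, hc⟩ := hpc
          subst hp; subst hc
          have hne : ln ≠ pl := by rw [hpl]; exact hln
          have hstep : pvLoopA mr (ln :: rs) (out, none, (0:Int))
              = pvLoopA mr rs (out ++ [ln], some ln, 0) := by
            simp [pvLoopA, hln]
          rw [hstep, ih (out ++ [ln]) (some ln) 0 (some (ln, 0)) (pvInv_push out ln hln)]
          simp [gB, hln, pvStep, hne, hcap, List.append_assoc]
        · rw [if_neg hpl] at hpc
          obtain ⟨hp, hc⟩ := hpc
          subst hp; rw [hc]
          by_cases he : ln = pl
          · -- same run continues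
            subst he
            have hstep : pvLoopA mr (ln :: rs) (out, some ln, pp)
                = pvLoopA mr rs ((if pp + 1 < mr then out ++ [ln] else out), some ln, pp + 1) := by
              simp [pvLoopA, hln]
            have hcond : (pp + 1 < mr) ↔ (pp + 1 < max 1 mr) := by omega
            have hinv' : pvInv (if pp + 1 < mr then out ++ [ln] else out) (some ln) (pp + 1)
                (some (ln, pp + 1)) := by
              refine ⟨by omega, by simp [hln], ?_⟩
              constructor
              · intro _; exact hln
              · intro _
                split
                · refine ⟨by simp, ?_⟩
                  rw [List.getLast?_concat]
                  simpa using hln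
                · exact hiff.mpr hpl
            rw [hstep, ih _ (some ln) (pp + 1) (some (ln, pp + 1)) hinv']
            have hout' : (if pp + 1 < mr then out ++ [ln] else out)
                = out ++ (if pp + 1 < max 1 mr then [ln] else []) := by
              rw [if_congr hcond rfl rfl]
              split <;> simp
            rw [hout']
            simp [gB, hln, pvStep, List.append_assoc]
          · -- new run starts
            have hstep : pvLoopA mr (ln :: rs) (out, some pl, pp)
                = pvLoopA mr rs (out ++ [ln], some ln, 0) := by
              have : ¬ (some ln = some pl) := by simpa using he
              simp [pvLoopA, hln, this]
            rw [hstep, ih (out ++ [ln]) (some ln) 0 (some (ln, 0)) (pvInv_push out ln hln)]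
            simp [gB, hln, pvStep, he, hcap, List.append_assoc]

theorem pv_zip_dropLast {α : Type} (y : α) (ys : List α) :
    ys.zip (List.map some ((y :: ys).dropLast)) = ys.zip (List.map some (y :: ys.dropLast)) := by
  cases ys with
  | nil => simp
  | cons z zs => rfl

theorem pv_Z (cap : Int) : ∀ (xs : List String) (x : String) (pp : Int),
    ((xs.zip (List.map some (x :: xs.dropLast))).zip (pvPosGo x pp xs)).filterMap
      (fun t => if (t.1.1 ≠ "" ∧ t.2 < cap) ∨ (t.1.1 = "" ∧ t.1.2 ≠ none ∧ t.1.2 ≠ some "") then some t.1.1 else none)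
      = gB cap (some (x, pp)) xs := by
  intro xs
  induction xs with
  | nil => intro x pp; rfl
  | cons y ys ih =>
    intro x pp
    simp only [List.map_cons, List.zip_cons_cons, pvPosGo, List.filterMap_cons]
    rw [pv_zip_dropLast y ys, ih y (if y = x then pp + 1 else 0)]
    by_cases hy : y = ""
    · subst hy
      by_cases hx : x = ""
      · simp [gB, pvLastNE, pvStep, hx]
      · simp [gB, pvLastNE, pvStep, hx]
    · by_cases hq : (if y = x then pp + 1 else 0) < cap
      · simp [gB, pvStep, hy, hq]
      · simp [gB, pvStep, hy, hq]

theorem pv_lemB (lines : List String) (mr : Int) :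
    limit_consecutive_repeats_py_alt lines mr = gB (max 1 mr) none lines := by
  cases lines with
  | nil => rfl
  | cons x xs =>
    have hcap : (0:Int) < max 1 mr := by omega
    unfold limit_consecutive_repeats_py_alt
    simp only [pvPos, List.zip_cons_cons, List.filterMap_cons]
    rw [pv_zip_dropLast x xs, pv_Z (max 1 mr) xs x 0]
    by_cases hx : x = ""
    · simp [gB, pvLastNE, pvStep, hx]
    · simp [gB, pvStep, hx, hcap]

-- ===== VERDICT (by name: the statement is the Claim_ definition above) =====
theorem limit_consecutive_repeats_py_spec : Claim_equal_limit_consecutive_repeats_py := by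
  intro lines mr _
  unfold Spec_limit_consecutive_repeats_py limit_consecutive_repeats_py
  rw [pv_lemB, pv_lemA mr lines [] none 0 none ⟨rfl, rfl, rfl⟩]
  simp
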